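-- pv_equiv track=rewrite | github.com/zzz136454872/leetcode | loudAndRich.py | loudAndRich
-- ===== SOURCE A (Python) =====
-- from typing import List
--
-- def loudAndRich(richer: List[List[int]],
--                 quiet: List[int]) -> List[int]:
--     n = len(quiet)
--     graph = [[] for i in range(n)]
--
--     for r in richer:
--         graph[r[1]].append(r[0])
--
--     mem = [-1 for i in range(n)]
--
--     def search(idx):
--         if mem[idx] != -1:
--             return mem[idx]
--         out = idx
--
--         for nidx in graph[idx]:
--             tmp = search(nidx)
--
--             if quiet[out] > quiet[tmp]:
--                 out = tmp
--         mem[idx] = out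
--
--         return out
--
--     for i in range(n):
--         search(i)
--
--     return mem
--
-- richer = [[1, 0], [2, 1], [3, 1], [3, 7], [4, 3], [5, 3], [6, 3]]
--
-- quiet = [3, 2, 5, 4, 6, 1, 7, 0]
-- ===== SOURCE B (Python) =====
-- from typing import List
--
-- def loudAndRich(richer: List[List[int]],
--                 quiet: List[int]) -> List[int]:
--     n = len(quiet)
--     adj = [[] for _ in range(n)]
--     for r in richer:
--         adj[r[1]].append(r[0])
--     res = []
--     for i in range(n):
--         seen = [False] * n
--         seen[i] = True
--         order = [i]
--         frontier = [i]
--         while frontier: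
--             nxt = []
--             for u in frontier:
--                 for v in adj[u]:
--                     if not seen[v]:
--                         seen[v] = True
--                         order.append(v)
--                         nxt.append(v)
--             frontier = nxt
--         best = i
--         for j in order:
--             if quiet[j] < quiet[best]:
--                 best = j
--         res.append(best)
--     return res
-- ===== Notes on version B (the rewrite author's own statement) =====
-- stated objective: alternative
-- what changed: Replaced the shared-memo recursive DFS by an iterative per-person breadth-first search: for each person an explicit frontier/seen worklist collects everyone richer, then a single linear scan picks the quietest; no recursion and no memo table.
-- outside the precondition, e.g. on loudAndRich([[-3, 2]], [8, -2, -1, -9]): A returns [0, 1, 1, 3], B returns [0, 1, -3, 3]; on loudAndRich([[1, 0], [2, 0], [3, 1]], [2, 1, 0, 0]): A returns [3, 3, 2, 3], B returns [2, 3, 2, 3]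
import Mathlib
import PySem

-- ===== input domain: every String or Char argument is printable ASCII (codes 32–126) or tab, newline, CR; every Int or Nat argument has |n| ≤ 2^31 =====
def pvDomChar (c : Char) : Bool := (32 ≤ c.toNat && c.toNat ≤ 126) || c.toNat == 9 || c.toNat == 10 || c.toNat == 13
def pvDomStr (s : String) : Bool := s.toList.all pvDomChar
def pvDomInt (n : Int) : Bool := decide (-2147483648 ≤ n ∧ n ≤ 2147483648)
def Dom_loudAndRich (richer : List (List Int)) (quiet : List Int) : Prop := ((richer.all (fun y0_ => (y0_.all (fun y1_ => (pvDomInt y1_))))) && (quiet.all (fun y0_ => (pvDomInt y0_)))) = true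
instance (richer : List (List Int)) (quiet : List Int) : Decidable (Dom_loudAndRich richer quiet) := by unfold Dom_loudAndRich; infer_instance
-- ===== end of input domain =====

-- B replaces A's shared-memo recursive DFS by an independent per-person BFS worklist plus a linear
-- minimum scan (objective: alternative decomposition, not claimed faster). Equality is claimed on
-- Pre_: in-range person indices, acyclic richer relation, duplicate-free quiet values.

-- ===== PORT A =====
-- shared by both ports: both Pythons build the adjacency rows with the identical loop
-- `for r in richer: graph[r[1]].append(r[0])`
def pvBuildGraph (richer : List (List Int)) (n : Nat) : List (List Int) :=
  richer.foldl (fun g r =>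
    match PySem.List.pyGet? r 1 with
    | none => g
    | some b =>
      match PySem.List.pyGet? r 0 with
      | none => g
      | some a =>
        match PySem.List.pyGet? g b with
        | none => g
        | some row => PySem.List.pySetD g b (row ++ [a])) (List.replicate n [])

-- A's recursive `search` with memo table; fuel = recursion-depth bound (Python's recursion is
-- bounded by n on every input on which it returns, so fuel n+1 is exact there)
def pvSearchA (g : List (List Int)) (quiet : List Int) : Nat → List Int → Int → Int × List Int
  | 0, mem, _ => (0, mem)
  | fuel+1, mem, idx =>
    match PySem.List.pyGet? mem idx with
    | none => (0, mem)
    | some m =>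
      if m ≠ -1 then (m, mem)
      else
        let p := ((PySem.List.pyGet? g idx).getD []).foldl (fun acc nidx =>
          let t := pvSearchA g quiet fuel acc.2 nidx
          (if (PySem.List.pyGet? quiet acc.1).getD 0 > (PySem.List.pyGet? quiet t.1).getD 0
           then t.1 else acc.1, t.2)) (idx, mem)
        (p.1, PySem.List.pySetD p.2 idx p.1)

def loudAndRich (richer : List (List Int)) (quiet : List Int) : List Int :=
  let n := quiet.length
  let graph := pvBuildGraph richer n
  (List.range n).foldl (fun mem i => (pvSearchA graph quiet (n+1) mem (i : Int)).2)
    (List.replicate n (-1 : Int))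

-- ===== PORT B =====
-- one BFS round: state (seen, order, nxt)
def pvBfsRound (g : List (List Int)) (frontier : List Int)
    (st0 : List Bool × List Int × List Int) : List Bool × List Int × List Int :=
  frontier.foldl (fun st u =>
    ((PySem.List.pyGet? g u).getD []).foldl (fun st v =>
      if (PySem.List.pyGet? st.1 v).getD true = false then
        (PySem.List.pySetD st.1 v true, st.2.1 ++ [v], st.2.2 ++ [v])
      else st) st) st0

-- `while frontier:`; fuel = round bound (each nonempty round discovers a new node or is the last)
def pvBfsLoop (g : List (List Int)) : Nat → List Int → List Bool → List Int → List Int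
  | 0, _, _, order => order
  | fuel+1, frontier, seen, order =>
    if frontier.isEmpty then order
    else
      let st := pvBfsRound g frontier (seen, order, [])
      pvBfsLoop g fuel st.2.2 st.1 st.2.1

def loudAndRich_alt (richer : List (List Int)) (quiet : List Int) : List Int :=
  let n := quiet.length
  let g := pvBuildGraph richer n
  (List.range n).foldl (fun res (i : Nat) =>
    let i : Int := (i : Int)
    let seen := PySem.List.pySetD (List.replicate n false) i true
    let order := pvBfsLoop g (n+2) [i] seen [i]
    let best := order.foldl (fun best j =>
      if (PySem.List.pyGet? quiet j).getD 0 < (PySem.List.pyGet? quiet best).getD 0 then j else best)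
      i
    res ++ [best]) []

-- ===== PRECONDITION & SPEC =====
-- edge list (from, to): entry [a, b] of `richer` is the edge b → a ("a is richer than b")
def pvEdges (richer : List (List Int)) : List (Int × Int) :=
  richer.filterMap (fun r => match r with | a :: b :: _ => some (b, a) | _ => none)

def pvAdjE (E : List (Int × Int)) (u : Int) : List Int :=
  (E.filter (fun e => e.1 == u)).map Prod.snd

def pvStep (E : List (Int × Int)) (s : List Int) : List Int :=
  PySem.Set.ofList (s ++ s.flatMap (pvAdjE E))

def pvIter (E : List (Int × Int)) : Nat → List Int → List Int
  | 0, s => s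
  | k+1, s => pvStep E (pvIter E k s)

def pvReach (E : List (Int × Int)) (n : Nat) (u : Int) : List Int := pvIter E n [u]

-- Pre_ excludes richer rows that are too short or name a person outside 0..n-1 (IndexError, or
-- Python's accidental negative-index wraparound colliding with A's -1 memo sentinel), cyclic
-- richer relations (A's recursion never returns), and quiet lists with duplicate values (the
-- quietest richer person is then ambiguous and A's DFS-discovery tie-break is accidental).
def Pre_loudAndRich (richer : List (List Int)) (quiet : List Int) : Prop :=
  (∀ r ∈ richer, 2 ≤ r.length ∧ 0 ≤ r.getD 0 0 ∧ r.getD 0 0 < (quiet.length : Int)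
      ∧ 0 ≤ r.getD 1 0 ∧ r.getD 1 0 < (quiet.length : Int)) ∧
  quiet.Nodup ∧
  (∀ e ∈ pvEdges richer, e.1 ∉ pvReach (pvEdges richer) quiet.length e.2)

instance (richer : List (List Int)) (quiet : List Int) : Decidable (Pre_loudAndRich richer quiet) := by
  unfold Pre_loudAndRich; infer_instance

def pvWitness_loudAndRich : List (List Int) × List Int :=
  ([[1, 0], [2, 1], [3, 1], [3, 7], [4, 3], [5, 3], [6, 3]], [3, 2, 5, 4, 6, 1, 7, 0])

def Spec_loudAndRich (richer : List (List Int)) (quiet : List Int) (out : List Int) : Prop := out = loudAndRich_alt richer quiet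
instance (richer : List (List Int)) (quiet : List Int) (out : List Int) : Decidable (Spec_loudAndRich richer quiet out) := by unfold Spec_loudAndRich; infer_instance

-- ===== CLAIM (what is proved, stated in full; the proofs are below) =====
def Claim_equal_loudAndRich : Prop := ∀ (richer : List (List Int)) (quiet : List Int), Dom_loudAndRich richer quiet → Pre_loudAndRich richer quiet → Spec_loudAndRich richer quiet (loudAndRich richer quiet)

-- ===== LEMMAS AND PROOFS =====

-- quiet[x] as both ports read it
def pvQ (quiet : List Int) (x : Int) : Int := (PySem.List.pyGet? quiet x).getD 0

-- reachability along edges (reflexive-transitive)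
inductive pvReaches (E : List (Int × Int)) : Int → Int → Prop
  | refl (u : Int) : pvReaches E u u
  | step {u v w : Int} : (u, v) ∈ E → pvReaches E v w → pvReaches E u w

def pvValid (E : List (Int × Int)) (n : Nat) : Prop :=
  ∀ p ∈ E, 0 ≤ p.1 ∧ p.1 < (n : Int) ∧ 0 ≤ p.2 ∧ p.2 < (n : Int)

def pvAcyc (E : List (Int × Int)) : Prop := ∀ u v, (u, v) ∈ E → ¬ pvReaches E v u

-- b is the (unique, by Nodup quiet) quietest person reachable from i
def pvIsBest (E : List (Int × Int)) (quiet : List Int) (i b : Int) : Prop :=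
  pvReaches E i b ∧ 0 ≤ b ∧ b < (quiet.length : Int) ∧
    ∀ j, pvReaches E i j → pvQ quiet b ≤ pvQ quiet j

theorem pvReaches_trans {E : List (Int × Int)} {a b c : Int}
    (h1 : pvReaches E a b) (h2 : pvReaches E b c) : pvReaches E a c := by
  induction h1 with
  | refl => exact h2
  | step he _ ih => exact .step he (ih h2)

theorem mem_pvAdjE {E : List (Int × Int)} {u v : Int} : v ∈ pvAdjE E u ↔ (u, v) ∈ E := by
  simp only [pvAdjE, List.mem_map, List.mem_filter]
  constructor
  · rintro ⟨⟨x, y⟩, ⟨hm, he⟩, rfl⟩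
    simpa using (by simpa using he : x = u) ▸ hm
  · intro h; exact ⟨(u, v), ⟨h, by simp⟩, rfl⟩

theorem pvClosed_mem {E : List (Int × Int)} {O : List Int} {u x : Int}
    (hO : ∀ a ∈ O, ∀ v, (a, v) ∈ E → v ∈ O) (hu : u ∈ O) (h : pvReaches E u x) : x ∈ O := by
  induction h with
  | refl => exact hu
  | step he _ ih => exact ih (hO _ hu _ he)

theorem pvIntBound {n : Nat} {l : List Int} (hnd : l.Nodup)
    (hr : ∀ x ∈ l, 0 ≤ x ∧ x < (n : Int)) : l.length ≤ n := by
  have hsub : l.toFinset ⊆ Finset.Ico (0 : Int) (n : Int) := by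
    intro x hx
    rcases hr x (List.mem_toFinset.1 hx) with ⟨h1, h2⟩
    exact Finset.mem_Ico.2 ⟨h1, h2⟩
  have hcard := Finset.card_le_card hsub
  rwa [List.card_toFinset, List.Nodup.dedup hnd, Int.card_Ico, sub_zero, Int.toNat_natCast] at hcard

theorem pvStep_subset {E : List (Int × Int)} {s : List Int} : s ⊆ pvStep E s := by
  intro x hx
  unfold pvStep
  rw [PySem.Set.mem_ofList]
  exact List.mem_append.2 (Or.inl hx)

theorem pvStep_edge {E : List (Int × Int)} {s : List Int} {u v : Int}
    (hu : u ∈ s) (he : (u, v) ∈ E) : v ∈ pvStep E s := by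
  unfold pvStep
  rw [PySem.Set.mem_ofList]
  exact List.mem_append.2 (Or.inr (List.mem_flatMap.2 ⟨u, hu, mem_pvAdjE.2 he⟩))

theorem pvStep_nodup {E : List (Int × Int)} {s : List Int} : (pvStep E s).Nodup :=
  PySem.Set.nodup_ofList _

theorem mem_pvStep {E : List (Int × Int)} {s : List Int} {x : Int}
    (hx : x ∈ pvStep E s) : x ∈ s ∨ ∃ u ∈ s, (u, x) ∈ E := by
  unfold pvStep at hx
  rw [PySem.Set.mem_ofList] at hx
  rcases List.mem_append.1 hx with h | h
  · exact Or.inl h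
  · rcases List.mem_flatMap.1 h with ⟨u, hu, hv⟩
    exact Or.inr ⟨u, hu, mem_pvAdjE.1 hv⟩

theorem pvIter_subset_succ {E : List (Int × Int)} {s : List Int} (k : Nat) :
    pvIter E k s ⊆ pvIter E (k + 1) s := by
  show pvIter E k s ⊆ pvStep E (pvIter E k s)
  exact pvStep_subset

theorem pvIter_subset_of_le {E : List (Int × Int)} {s : List Int} {j m : Nat} (h : j ≤ m) :
    pvIter E j s ⊆ pvIter E m s := by
  induction m with
  | zero => simp [Nat.le_zero.1 h]
  | succ m ih =>
    rcases Nat.lt_or_ge j (m + 1) with hlt | hge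
    · exact fun x hx => pvIter_subset_succ m (ih (Nat.lt_succ_iff.1 hlt) hx)
    · have : j = m + 1 := le_antisymm h hge
      simp [this]

theorem pvIter_nodup {E : List (Int × Int)} {s : List Int} (hs : s.Nodup) (k : Nat) :
    (pvIter E k s).Nodup := by
  cases k with
  | zero => exact hs
  | succ k => exact pvStep_nodup

theorem pvIter_range {E : List (Int × Int)} {n : Nat} {s : List Int}
    (hv : pvValid E n) (hs : ∀ x ∈ s, 0 ≤ x ∧ x < (n : Int)) (k : Nat) :
    ∀ x ∈ pvIter E k s, 0 ≤ x ∧ x < (n : Int) := by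
  induction k with
  | zero => exact hs
  | succ k ih =>
    intro x hx
    rcases mem_pvStep hx with h | ⟨u, _, he⟩
    · exact ih x h
    · have := hv _ he
      exact ⟨this.2.2.1, this.2.2.2⟩

theorem pvReach_complete {E : List (Int × Int)} {n : Nat} {u x : Int}
    (hv : pvValid E n) (hu0 : 0 ≤ u) (hun : u < (n : Int))
    (h : pvReaches E u x) : x ∈ pvReach E n u := by
  have hs : ∀ y ∈ ([u] : List Int), 0 ≤ y ∧ y < (n : Int) := by
    intro y hy; rcases List.mem_singleton.1 hy with rfl; exact ⟨hu0, hun⟩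
  -- either some iterate ≤ n is already closed, or lengths grow past n
  have key : ∀ k : Nat, (∃ j ≤ k, pvStep E (pvIter E j [u]) ⊆ pvIter E j [u]) ∨
      k + 1 ≤ (pvIter E k [u]).length := by
    intro k
    induction k with
    | zero => right; simp [pvIter]
    | succ k ih =>
      rcases ih with ⟨j, hj, hcl⟩ | hlen
      · exact Or.inl ⟨j, Nat.le_succ_of_le hj, hcl⟩
      · by_cases hcl : pvStep E (pvIter E k [u]) ⊆ pvIter E k [u]
        · exact Or.inl ⟨k, Nat.le_succ k, hcl⟩
        · right
          have hex : ∃ y, y ∈ pvStep E (pvIter E k [u]) ∧ y ∉ pvIter E k [u] := by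
            by_contra hno
            push Not at hno
            exact hcl fun y hy => hno y hy
          rcases hex with ⟨y, hy, hyn⟩
          have hndk : (pvIter E k [u]).Nodup := pvIter_nodup (by simp) k
          have hndk1 : (pvIter E (k + 1) [u]).Nodup := pvStep_nodup
          have hsub : pvIter E k [u] ⊆ pvIter E (k + 1) [u] := pvIter_subset_succ k
          have hins : insert y (pvIter E k [u]).toFinset ⊆ (pvIter E (k + 1) [u]).toFinset := by
            intro z hz
            rcases Finset.mem_insert.1 hz with rfl | hz
            · exact List.mem_toFinset.2 hy
            · exact List.mem_toFinset.2 (hsub (List.mem_toFinset.1 hz))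
          have hcard := Finset.card_le_card hins
          rw [Finset.card_insert_of_notMem (by simpa using hyn),
              List.card_toFinset, List.Nodup.dedup hndk,
              List.card_toFinset, List.Nodup.dedup hndk1] at hcard
          omega
  rcases key n with ⟨j, hj, hcl⟩ | hlen
  · -- the j-th iterate is closed, contains u, hence contains x; it sits inside the n-th
    have hu : u ∈ pvIter E j [u] := pvIter_subset_of_le (Nat.zero_le j) (by simp [pvIter])
    have hx : x ∈ pvIter E j [u] := by
      refine pvClosed_mem (fun a ha v he => ?_) hu h
      exact hcl (pvStep_edge ha he)
    exact pvIter_subset_of_le hj hx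
  · -- impossible: a nodup list of ints in [0, n) longer than n
    have := pvIntBound (pvIter_nodup (by simp) n) (pvIter_range hv hs n)
    omega

theorem pre_valid {richer : List (List Int)} {quiet : List Int}
    (hpre : Pre_loudAndRich richer quiet) : pvValid (pvEdges richer) quiet.length := by
  rintro ⟨b, a⟩ hab
  rcases List.mem_filterMap.1 hab with ⟨r, hr, hfr⟩
  rcases hpre.1 r hr with ⟨hlen, h0a, h0b, h1a, h1b⟩
  match r, hfr with
  | x :: y :: t, hfr =>
    simp only [Option.some.injEq, Prod.mk.injEq] at hfr
    obtain ⟨rfl, rfl⟩ := hfr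
    simp only [List.getD_cons_zero, List.getD_cons_succ] at h0a h0b h1a h1b
    exact ⟨h1a, h1b, h0a, h0b⟩

theorem pre_acyc {richer : List (List Int)} {quiet : List Int}
    (hpre : Pre_loudAndRich richer quiet) : pvAcyc (pvEdges richer) := by
  intro u v he hreach
  have hv := pre_valid hpre _ he
  exact hpre.2.2 (u, v) he (pvReach_complete (pre_valid hpre) hv.2.2.1 hv.2.2.2 hreach)


-- the built graph: n rows, row k = adjacency of k
theorem pvBuildGraph_go {n : Nat} : ∀ (richer : List (List Int)) (g : List (List Int)),
    (∀ r ∈ richer, 2 ≤ r.length ∧ 0 ≤ r.getD 0 0 ∧ r.getD 0 0 < (n : Int)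
        ∧ 0 ≤ r.getD 1 0 ∧ r.getD 1 0 < (n : Int)) →
    g.length = n →
    (richer.foldl (fun g r =>
      match PySem.List.pyGet? r 1 with
      | none => g
      | some b =>
        match PySem.List.pyGet? r 0 with
        | none => g
        | some a =>
          match PySem.List.pyGet? g b with
          | none => g
          | some row => PySem.List.pySetD g b (row ++ [a])) g).length = n ∧
    ∀ k : Nat, k < n →
      (richer.foldl (fun g r =>
        match PySem.List.pyGet? r 1 with
        | none => g
        | some b =>
          match PySem.List.pyGet? r 0 with
          | none => g
          | some a =>
            match PySem.List.pyGet? g b with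
            | none => g
            | some row => PySem.List.pySetD g b (row ++ [a])) g).getD k []
        = g.getD k [] ++ pvAdjE (pvEdges richer) (k : Int)
  | [], g, hval, hlen => by
    refine ⟨hlen, fun k hk => ?_⟩
    simp [pvEdges, pvAdjE]
  | r :: rest, g, hval, hlen => by
    obtain ⟨hrl, h0a, h0b, h1a, h1b⟩ := hval r (by simp)
    match r, hrl with
    | a :: b :: t, _ =>
      simp only [List.getD_cons_zero, List.getD_cons_succ] at h0a h0b h1a h1b
      have hg1 : PySem.List.pyGet? (a :: b :: t) 1 = some b := by
        simp [PySem.List.pyGet?, PySem.List.pyIdx?]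
      have hg0 : PySem.List.pyGet? (a :: b :: t) 0 = some a := by
        simp [PySem.List.pyGet?, PySem.List.pyIdx?, show ((0:Int) ≤ ↑t.length + 1) by omega]
      have hbn : b < (g.length : Int) := by rw [hlen]; exact h1b
      have hgb : PySem.List.pyGet? g b = some (g[b.toNat]'(by omega)) :=
        PySem.List.pyGet?_eq_some_getElem (xs := g) (i := b) h1a hbn
      have hset : PySem.List.pySetD g b (g[b.toNat]'(by omega) ++ [a])
          = g.set b.toNat (g[b.toNat]'(by omega) ++ [a]) :=
        PySem.List.pySetD_of_nonneg g _ h1a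
      set g' := g.set b.toNat (g[b.toNat]'(by omega) ++ [a]) with hg'
      have hlen' : g'.length = n := by simp [hg', hlen]
      have hval' : ∀ r' ∈ rest, 2 ≤ r'.length ∧ 0 ≤ r'.getD 0 0 ∧ r'.getD 0 0 < (n : Int)
          ∧ 0 ≤ r'.getD 1 0 ∧ r'.getD 1 0 < (n : Int) := fun r' hr' => hval r' (by simp [hr'])
      obtain ⟨ihlen, ihrow⟩ := pvBuildGraph_go rest g' hval' hlen'
      refine ⟨by rw [List.foldl_cons]; simp only [hg1, hg0, hgb, hset]; exact ihlen, ?_⟩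
      intro k hk
      rw [List.foldl_cons]
      simp only [hg1, hg0, hgb, hset]
      rw [ihrow k hk]
      have hedges : pvEdges ((a :: b :: t) :: rest) = (b, a) :: pvEdges rest := by
        simp [pvEdges]
      rw [hedges]
      by_cases hbk : b = (k : Int)
      · have hbtk : b.toNat = k := by omega
        have hgk : g'.getD k [] = g.getD k [] ++ [a] := by
          rw [hg', ← hbtk]
          have hblt : b.toNat < g.length := by omega
          simp [List.getD_eq_getElem?_getD, List.getElem?_set_self (by omega),
            List.getElem?_eq_getElem hblt]
        have hadj : pvAdjE ((b, a) :: pvEdges rest) (k : Int)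
            = a :: pvAdjE (pvEdges rest) (k : Int) := by
          simp [pvAdjE, hbk]
        rw [hgk, hadj]
        simp
      · have hgk : g'.getD k [] = g.getD k [] := by
          rw [hg']
          have : b.toNat ≠ k := by omega
          simp [List.getD_eq_getElem?_getD, List.getElem?_set_ne this]
        have hadj : pvAdjE ((b, a) :: pvEdges rest) (k : Int)
            = pvAdjE (pvEdges rest) (k : Int) := by
          simp [pvAdjE, hbk]
        rw [hgk, hadj]

theorem pvBuildGraph_spec {richer : List (List Int)} {quiet : List Int}
    (hpre : Pre_loudAndRich richer quiet) :
    (pvBuildGraph richer quiet.length).length = quiet.length ∧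
    ∀ k : Nat, k < quiet.length →
      (pvBuildGraph richer quiet.length).getD k [] = pvAdjE (pvEdges richer) (k : Int) := by
  obtain ⟨hlen, hrow⟩ := pvBuildGraph_go richer (List.replicate quiet.length [])
    hpre.1 (by simp)
  refine ⟨hlen, fun k hk => ?_⟩
  have := hrow k hk
  unfold pvBuildGraph
  rw [this, List.getD_eq_getElem?_getD, List.getElem?_replicate_of_lt hk]
  rfl

theorem pvIsBest_unique {E : List (Int × Int)} {quiet : List Int} {i b b' : Int}
    (hnd : quiet.Nodup) (h1 : pvIsBest E quiet i b) (h2 : pvIsBest E quiet i b') : b = b' := by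
  obtain ⟨hr1, hb0, hbn, hm1⟩ := h1
  obtain ⟨hr2, hb0', hbn', hm2⟩ := h2
  have hq : pvQ quiet b = pvQ quiet b' := le_antisymm (hm1 _ hr2) (hm2 _ hr1)
  have e1 : pvQ quiet b = quiet[b.toNat]'(by omega) := by
    unfold pvQ
    rw [PySem.List.pyGet?_eq_some_getElem (xs:=quiet) (i:=b) hb0 hbn]
    rfl
  have e2 : pvQ quiet b' = quiet[b'.toNat]'(by omega) := by
    unfold pvQ
    rw [PySem.List.pyGet?_eq_some_getElem (xs:=quiet) (i:=b') hb0' hbn']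
    rfl
  rw [e1, e2] at hq
  have := (hnd.getElem_inj_iff).1 hq
  omega

theorem pvGetD_of_range {α : Type} {d : α} {xs : List α} {i : Int} (h0 : 0 ≤ i) (hl : i < (xs.length : Int)) :
    PySem.List.pyGet? xs i = some (xs.getD i.toNat d) := by
  rw [PySem.List.pyGet?_eq_some_getElem (xs := xs) (i := i) h0 hl,
    List.getD_eq_getElem?_getD, List.getElem?_eq_getElem (by omega)]
  rfl

def pvMemInv (E : List (Int × Int)) (quiet : List Int) (mem : List Int) : Prop :=
  mem.length = quiet.length ∧
  ∀ k : Nat, k < quiet.length →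
    mem.getD k 0 = -1 ∨ pvIsBest E quiet (k : Int) (mem.getD k 0)

def pvSAStmt (E : List (Int × Int)) (quiet : List Int) (g : List (List Int)) (fuel : Nat) : Prop :=
  ∀ (mem : List Int) (idx : Int) (path : List Int),
    pvMemInv E quiet mem →
    0 ≤ idx → idx < (quiet.length : Int) →
    path.Nodup → (∀ a ∈ path, 0 ≤ a ∧ a < (quiet.length : Int)) → idx ∉ path →
    (∀ a ∈ path, pvReaches E a idx) →
    quiet.length + 1 ≤ path.length + fuel →
    pvMemInv E quiet (pvSearchA g quiet fuel mem idx).2 ∧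
    pvIsBest E quiet idx (pvSearchA g quiet fuel mem idx).1 ∧
    (∀ k : Nat, k < quiet.length → mem.getD k 0 ≠ -1 →
      (pvSearchA g quiet fuel mem idx).2.getD k 0 = mem.getD k 0) ∧
    (pvSearchA g quiet fuel mem idx).2.getD idx.toNat 0 ≠ -1

theorem pvSearchGo_correct (E : List (Int × Int)) (quiet : List Int) (g : List (List Int))
    (hv : pvValid E quiet.length) (hac : pvAcyc E) (fuel : Nat)
    (HSA : pvSAStmt E quiet g fuel) :
    ∀ (row : List Int) (out : Int) (mem : List Int) (idx : Int) (path : List Int),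
    (∀ v ∈ row, (idx, v) ∈ E) →
    pvMemInv E quiet mem →
    0 ≤ idx → idx < (quiet.length : Int) →
    path.Nodup → (∀ a ∈ path, 0 ≤ a ∧ a < (quiet.length : Int)) → idx ∉ path →
    (∀ a ∈ path, pvReaches E a idx) →
    quiet.length ≤ path.length + fuel →
    pvReaches E idx out → 0 ≤ out → out < (quiet.length : Int) →
    (pvMemInv E quiet (row.foldl (fun acc nidx =>
        let t := pvSearchA g quiet fuel acc.2 nidx
        (if (PySem.List.pyGet? quiet acc.1).getD 0 > (PySem.List.pyGet? quiet t.1).getD 0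
         then t.1 else acc.1, t.2)) (out, mem)).2) ∧
    (∀ k : Nat, k < quiet.length → mem.getD k 0 ≠ -1 →
      (row.foldl (fun acc nidx =>
        let t := pvSearchA g quiet fuel acc.2 nidx
        (if (PySem.List.pyGet? quiet acc.1).getD 0 > (PySem.List.pyGet? quiet t.1).getD 0
         then t.1 else acc.1, t.2)) (out, mem)).2.getD k 0 = mem.getD k 0) ∧
    pvReaches E idx (row.foldl (fun acc nidx =>
        let t := pvSearchA g quiet fuel acc.2 nidx
        (if (PySem.List.pyGet? quiet acc.1).getD 0 > (PySem.List.pyGet? quiet t.1).getD 0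
         then t.1 else acc.1, t.2)) (out, mem)).1 ∧
    0 ≤ (row.foldl (fun acc nidx =>
        let t := pvSearchA g quiet fuel acc.2 nidx
        (if (PySem.List.pyGet? quiet acc.1).getD 0 > (PySem.List.pyGet? quiet t.1).getD 0
         then t.1 else acc.1, t.2)) (out, mem)).1 ∧
    (row.foldl (fun acc nidx =>
        let t := pvSearchA g quiet fuel acc.2 nidx
        (if (PySem.List.pyGet? quiet acc.1).getD 0 > (PySem.List.pyGet? quiet t.1).getD 0
         then t.1 else acc.1, t.2)) (out, mem)).1 < (quiet.length : Int) ∧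
    pvQ quiet (row.foldl (fun acc nidx =>
        let t := pvSearchA g quiet fuel acc.2 nidx
        (if (PySem.List.pyGet? quiet acc.1).getD 0 > (PySem.List.pyGet? quiet t.1).getD 0
         then t.1 else acc.1, t.2)) (out, mem)).1 ≤ pvQ quiet out ∧
    ∀ v ∈ row, ∀ j, pvReaches E v j →
      pvQ quiet (row.foldl (fun acc nidx =>
        let t := pvSearchA g quiet fuel acc.2 nidx
        (if (PySem.List.pyGet? quiet acc.1).getD 0 > (PySem.List.pyGet? quiet t.1).getD 0
         then t.1 else acc.1, t.2)) (out, mem)).1 ≤ pvQ quiet j := by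
  intro row
  induction row with
  | nil =>
    intro out mem idx path hrow hinv h0 hn hpnd hpr hip hpre hfuel hro ho0 hon
    refine ⟨hinv, fun k hk _ => rfl, hro, ho0, hon, le_refl _, by simp⟩
  | cons nidx rest ih =>
    intro out mem idx path hrow hinv h0 hn hpnd hpr hip hpre hfuel hro ho0 hon
    have hedge : (idx, nidx) ∈ E := hrow nidx (by simp)
    have hnrange := hv _ hedge
    have hn0 : 0 ≤ nidx := hnrange.2.2.1
    have hnn : nidx < (quiet.length : Int) := hnrange.2.2.2
    -- nidx is not on the extended path
    have hnip : nidx ∉ idx :: path := by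
      intro hmem
      rcases List.mem_cons.1 hmem with rfl | hmem
      · exact hac _ _ hedge (pvReaches.refl _)
      · exact hac _ _ hedge (hpre _ hmem)
    have hreach' : ∀ a ∈ idx :: path, pvReaches E a nidx := by
      intro a ha
      rcases List.mem_cons.1 ha with rfl | ha
      · exact .step hedge (.refl _)
      · exact pvReaches_trans (hpre a ha) (.step hedge (.refl _))
    obtain ⟨hinv1, hbest, hkeep, _⟩ := HSA mem nidx (idx :: path) hinv hn0 hnn
      (List.nodup_cons.2 ⟨hip, hpnd⟩)
      (by intro a ha; rcases List.mem_cons.1 ha with rfl | ha; exact ⟨h0, hn⟩; exact hpr a ha)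
      hnip hreach' (by simp; omega)
    set t := pvSearchA g quiet fuel mem nidx with ht
    set out1 := if (PySem.List.pyGet? quiet out).getD 0 > (PySem.List.pyGet? quiet t.1).getD 0
      then t.1 else out with hout1
    have hro1 : pvReaches E idx out1 := by
      rw [hout1]; split
      · exact .step hedge hbest.1
      · exact hro
    have ho10 : 0 ≤ out1 := by rw [hout1]; split; exact hbest.2.1; exact ho0
    have ho1n : out1 < (quiet.length : Int) := by rw [hout1]; split; exact hbest.2.2.1; exact hon
    have hq1le : pvQ quiet out1 ≤ pvQ quiet out := by
      rw [hout1]; split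
      · next hlt => exact le_of_lt (by simpa [pvQ] using hlt)
      · exact le_refl _
    have hq1t : pvQ quiet out1 ≤ pvQ quiet t.1 := by
      rw [hout1]; split
      · exact le_refl _
      · next hlt => simpa [pvQ] using hlt
    obtain ⟨cinv, ckeep, cro, c0, cn, cle, ccov⟩ :=
      ih out1 t.2 idx path (fun v hv' => hrow v (by simp [hv'])) hinv1 h0 hn hpnd hpr hip hpre
        hfuel hro1 ho10 ho1n
    simp only [List.foldl_cons]
    rw [← ht, ← hout1]
    refine ⟨cinv, ?_, cro, c0, cn, le_trans cle hq1le, ?_⟩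
    · intro k hk hkne
      rw [ckeep k hk (by rw [hkeep k hk hkne]; exact hkne), hkeep k hk hkne]
    · intro v hvm j hj
      rcases List.mem_cons.1 hvm with rfl | hvm
      · exact le_trans (le_trans cle hq1t) (hbest.2.2.2 j hj)
      · exact ccov v hvm j hj

theorem pvSearchA_correct (E : List (Int × Int)) (quiet : List Int) (g : List (List Int))
    (hv : pvValid E quiet.length) (hac : pvAcyc E)
    (hglen : g.length = quiet.length)
    (hg : ∀ k : Nat, k < quiet.length → g.getD k [] = pvAdjE E (k : Int)) :
    ∀ fuel : Nat, pvSAStmt E quiet g fuel := by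
  intro fuel
  induction fuel with
  | zero =>
    intro mem idx path hinv h0 hn hpnd hpr hip hpre hfuel
    exfalso
    have := pvIntBound hpnd hpr
    omega
  | succ fuel ihf =>
    intro mem idx path hinv h0 hn hpnd hpr hip hpre hfuel
    have hmlen : mem.length = quiet.length := hinv.1
    have hmget : PySem.List.pyGet? mem idx = some (mem.getD idx.toNat 0) :=
      pvGetD_of_range (d := 0) (xs := mem) (i := idx) h0 (by omega)
    have hidxnat : ((idx.toNat : Nat) : Int) = idx := by omega
    by_cases hhit : mem.getD idx.toNat 0 = -1
    · -- memo miss: run the fold over the adjacency row, then store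
      have hrow : (PySem.List.pyGet? g idx).getD [] = pvAdjE E idx := by
        rw [pvGetD_of_range (d := []) (xs := g) (i := idx) h0 (by rw [hglen]; omega)]
        simpa [hidxnat] using hg idx.toNat (by omega)
      have hrowmem : ∀ v ∈ pvAdjE E idx, (idx, v) ∈ E := fun v hv' => mem_pvAdjE.1 hv'
      obtain ⟨cinv, ckeep, cro, c0, cn, cle, ccov⟩ :=
        pvSearchGo_correct E quiet g hv hac fuel ihf (pvAdjE E idx) idx mem idx path
          hrowmem hinv h0 hn hpnd hpr hip hpre (by omega) (.refl _) h0 hn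
      set p := (pvAdjE E idx).foldl (fun acc nidx =>
        let t := pvSearchA g quiet fuel acc.2 nidx
        (if (PySem.List.pyGet? quiet acc.1).getD 0 > (PySem.List.pyGet? quiet t.1).getD 0
         then t.1 else acc.1, t.2)) (idx, mem) with hp
      have hres : pvSearchA g quiet (fuel + 1) mem idx
          = (p.1, PySem.List.pySetD p.2 idx p.1) := by
        rw [pvSearchA, hmget]
        simp only [hhit, ne_eq, not_true_eq_false, if_false]
        rw [hrow, ← hp]
      have hbest : pvIsBest E quiet idx p.1 := by
        refine ⟨cro, c0, cn, fun j hj => ?_⟩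
        cases hj with
        | refl => exact cle
        | step he hj' => exact ccov _ (mem_pvAdjE.2 he) _ hj'
      have hp2len : p.2.length = quiet.length := cinv.1
      have hsetd : PySem.List.pySetD p.2 idx p.1 = p.2.set idx.toNat p.1 :=
        PySem.List.pySetD_of_nonneg p.2 p.1 h0
      have hsetlen : (PySem.List.pySetD p.2 idx p.1).length = quiet.length := by
        rw [hsetd]; simpa using hp2len
      have hgetset_self : (PySem.List.pySetD p.2 idx p.1).getD idx.toNat 0 = p.1 := by
        rw [hsetd, List.getD_eq_getElem?_getD, List.getElem?_set_self (by omega)]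
        rfl
      have hgetset_ne : ∀ k : Nat, k ≠ idx.toNat →
          (PySem.List.pySetD p.2 idx p.1).getD k 0 = p.2.getD k 0 := by
        intro k hk
        rw [hsetd, List.getD_eq_getElem?_getD, List.getElem?_set_ne (fun h => hk h.symm),
          List.getD_eq_getElem?_getD]
      rw [hres]
      refine ⟨⟨hsetlen, fun k hk => ?_⟩, by simpa using hbest, fun k hk hkne => ?_, by rw [hgetset_self]; omega⟩
      · by_cases hkidx : k = idx.toNat
        · subst hkidx
          right
          rw [hgetset_self, hidxnat]
          exact hbest
        · rw [hgetset_ne k hkidx]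
          exact cinv.2 k hk
      · have hkidx : k ≠ idx.toNat := by
          intro h; subst h; exact hkne hhit
        rw [hgetset_ne k hkidx]
        exact ckeep k hk hkne
    · -- memo hit
      have hres : pvSearchA g quiet (fuel + 1) mem idx = (mem.getD idx.toNat 0, mem) := by
        rw [pvSearchA, hmget]
        simp only []
        rw [if_pos hhit]
      rw [hres]
      rcases hinv.2 idx.toNat (by omega) with h | h
      · exact absurd h hhit
      · exact ⟨hinv, by simpa [hidxnat] using h, fun k hk _ => rfl, hhit⟩

theorem pvALoop (E : List (Int × Int)) (quiet : List Int) (g : List (List Int))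
    (hv : pvValid E quiet.length) (hac : pvAcyc E)
    (hglen : g.length = quiet.length)
    (hg : ∀ k : Nat, k < quiet.length → g.getD k [] = pvAdjE E (k : Int)) :
    ∀ (is : List Nat) (mem : List Int),
    pvMemInv E quiet mem →
    (∀ i ∈ is, i < quiet.length) →
    pvMemInv E quiet (is.foldl (fun mem i =>
      (pvSearchA g quiet (quiet.length + 1) mem (i : Int)).2) mem) ∧
    (∀ k : Nat, k < quiet.length → mem.getD k 0 ≠ -1 →
      (is.foldl (fun mem i =>
        (pvSearchA g quiet (quiet.length + 1) mem (i : Int)).2) mem).getD k 0 = mem.getD k 0) ∧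
    (∀ i ∈ is, (is.foldl (fun mem i =>
      (pvSearchA g quiet (quiet.length + 1) mem (i : Int)).2) mem).getD i 0 ≠ -1) := by
  intro is
  induction is with
  | nil => intro mem hinv _; exact ⟨hinv, fun _ _ _ => rfl, by simp⟩
  | cons i rest ih =>
    intro mem hinv his
    have hi : i < quiet.length := his i (by simp)
    obtain ⟨hinv1, _, hkeep1, hset1⟩ :=
      pvSearchA_correct E quiet g hv hac hglen hg (quiet.length + 1) mem (i : Int) []
        hinv (by omega) (by exact_mod_cast hi) (by simp) (by simp) (by simp) (by simp)
        (by simp)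
    set mem1 := (pvSearchA g quiet (quiet.length + 1) mem (i : Int)).2 with hm1
    obtain ⟨hinvf, hkeepf, hsetf⟩ := ih mem1 hinv1 (fun j hj => his j (by simp [hj]))
    have htn : ((i : Int).toNat) = i := by omega
    rw [htn] at hset1
    have hstep : (i :: rest).foldl (fun mem i =>
        (pvSearchA g quiet (quiet.length + 1) mem (i : Int)).2) mem
        = rest.foldl (fun mem i =>
        (pvSearchA g quiet (quiet.length + 1) mem (i : Int)).2) mem1 := by
      simp [hm1]
    rw [hstep]
    refine ⟨hinvf, fun k hk hkne => ?_, fun j hj => ?_⟩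
    · rw [hkeepf k hk (by rw [hkeep1 k hk hkne]; exact hkne), hkeep1 k hk hkne]
    · rcases List.mem_cons.1 hj with rfl | hj
      · rw [hkeepf j hi hset1]; exact hset1
      · exact hsetf j hj

theorem loudAndRich_A_spec (richer : List (List Int)) (quiet : List Int)
    (hpre : Pre_loudAndRich richer quiet) :
    (loudAndRich richer quiet).length = quiet.length ∧
    ∀ k : Nat, k < quiet.length →
      pvIsBest (pvEdges richer) quiet (k : Int) ((loudAndRich richer quiet).getD k 0) := by
  obtain ⟨hglen, hg⟩ := pvBuildGraph_spec hpre
  have hv := pre_valid hpre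
  have hac := pre_acyc hpre
  have hnd := hpre.2.1
  have hinv0 : pvMemInv (pvEdges richer) quiet (List.replicate quiet.length (-1 : Int)) := by
    refine ⟨by simp, fun k hk => ?_⟩
    left
    rw [List.getD_eq_getElem?_getD, List.getElem?_replicate_of_lt hk]
    rfl
  obtain ⟨hinvf, _, hsetf⟩ := pvALoop (pvEdges richer) quiet
    (pvBuildGraph richer quiet.length) hv hac hglen hg
    (List.range quiet.length) (List.replicate quiet.length (-1 : Int)) hinv0
    (fun i hi => List.mem_range.1 hi)
  have hA : loudAndRich richer quiet = (List.range quiet.length).foldl (fun mem i =>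
      (pvSearchA (pvBuildGraph richer quiet.length) quiet (quiet.length + 1) mem (i : Int)).2)
      (List.replicate quiet.length (-1 : Int)) := rfl
  rw [hA]
  refine ⟨hinvf.1, fun k hk => ?_⟩
  rcases hinvf.2 k hk with hz | hb
  · exact absurd hz (hsetf k (List.mem_range.2 hk))
  · exact hb

theorem pvGetD_irrel {α : Type} {xs : List α} {k : Nat} (hk : k < xs.length) (d d' : α) :
    xs.getD k d = xs.getD k d' := by
  rw [List.getD_eq_getElem?_getD, List.getD_eq_getElem?_getD, List.getElem?_eq_getElem hk]
  rfl

theorem pvLenLt {α : Type} [DecidableEq α] {a b : List α} (h1 : a.Nodup) (h2 : b.Nodup)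
    (hsub : a ⊆ b) {x : α} (hx : x ∈ b) (hxa : x ∉ a) : a.length + 1 ≤ b.length := by
  have hins : insert x a.toFinset ⊆ b.toFinset := by
    intro z hz
    rcases Finset.mem_insert.1 hz with rfl | hz
    · exact List.mem_toFinset.2 hx
    · exact List.mem_toFinset.2 (hsub (List.mem_toFinset.1 hz))
  have hcard := Finset.card_le_card hins
  rwa [Finset.card_insert_of_notMem (by simpa using hxa),
    List.card_toFinset, List.Nodup.dedup h1, List.card_toFinset, List.Nodup.dedup h2] at hcard

def pvBInv (E : List (Int × Int)) (quiet : List Int) (i : Int)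
    (seen : List Bool) (order : List Int) : Prop :=
  seen.length = quiet.length ∧ order.Nodup ∧
  (∀ v ∈ order, 0 ≤ v ∧ v < (quiet.length : Int) ∧ pvReaches E i v) ∧
  (∀ v : Int, 0 ≤ v → v < (quiet.length : Int) → ((seen.getD v.toNat false = true) ↔ v ∈ order))

theorem pvBfsInner (E : List (Int × Int)) (quiet : List Int) (hv : pvValid E quiet.length)
    (i : Int) :
    ∀ (row : List Int) (u : Int) (seen : List Bool) (order nxt order0 : List Int),
    pvBInv E quiet i seen order →
    (∀ v ∈ row, (u, v) ∈ E) → pvReaches E i u →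
    order0 ⊆ order → nxt ⊆ order →
    (∀ v ∈ order, v ∈ order0 ∨ v ∈ nxt) → (∀ v ∈ nxt, v ∉ order0) →
    (pvBInv E quiet i (row.foldl (fun st v =>
        if (PySem.List.pyGet? st.1 v).getD true = false then
          (PySem.List.pySetD st.1 v true, st.2.1 ++ [v], st.2.2 ++ [v])
        else st) (seen, order, nxt)).1
      (row.foldl (fun st v =>
        if (PySem.List.pyGet? st.1 v).getD true = false then
          (PySem.List.pySetD st.1 v true, st.2.1 ++ [v], st.2.2 ++ [v])
        else st) (seen, order, nxt)).2.1) ∧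
    order ⊆ (row.foldl (fun st v =>
        if (PySem.List.pyGet? st.1 v).getD true = false then
          (PySem.List.pySetD st.1 v true, st.2.1 ++ [v], st.2.2 ++ [v])
        else st) (seen, order, nxt)).2.1 ∧
    (row.foldl (fun st v =>
        if (PySem.List.pyGet? st.1 v).getD true = false then
          (PySem.List.pySetD st.1 v true, st.2.1 ++ [v], st.2.2 ++ [v])
        else st) (seen, order, nxt)).2.2 ⊆ (row.foldl (fun st v =>
        if (PySem.List.pyGet? st.1 v).getD true = false then
          (PySem.List.pySetD st.1 v true, st.2.1 ++ [v], st.2.2 ++ [v])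
        else st) (seen, order, nxt)).2.1 ∧
    (∀ v ∈ (row.foldl (fun st v =>
        if (PySem.List.pyGet? st.1 v).getD true = false then
          (PySem.List.pySetD st.1 v true, st.2.1 ++ [v], st.2.2 ++ [v])
        else st) (seen, order, nxt)).2.1, v ∈ order0 ∨ v ∈ (row.foldl (fun st v =>
        if (PySem.List.pyGet? st.1 v).getD true = false then
          (PySem.List.pySetD st.1 v true, st.2.1 ++ [v], st.2.2 ++ [v])
        else st) (seen, order, nxt)).2.2) ∧
    (∀ v ∈ (row.foldl (fun st v =>
        if (PySem.List.pyGet? st.1 v).getD true = false then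
          (PySem.List.pySetD st.1 v true, st.2.1 ++ [v], st.2.2 ++ [v])
        else st) (seen, order, nxt)).2.2, v ∉ order0) ∧
    (∀ v ∈ row, v ∈ (row.foldl (fun st v =>
        if (PySem.List.pyGet? st.1 v).getD true = false then
          (PySem.List.pySetD st.1 v true, st.2.1 ++ [v], st.2.2 ++ [v])
        else st) (seen, order, nxt)).2.1) := by
  intro row
  induction row with
  | nil =>
    intro u seen order nxt order0 hbinv _ _ h0sub hnsub hsplit hnew
    exact ⟨hbinv, fun _ h => h, hnsub, hsplit, hnew, by simp⟩
  | cons v rest ih =>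
    intro u seen order nxt order0 hbinv hrow hru h0sub hnsub hsplit hnew
    obtain ⟨hslen, hond, hor, hiff⟩ := hbinv
    have hedge : (u, v) ∈ E := hrow v (by simp)
    have hvr := hv _ hedge
    have hv0 : 0 ≤ v := hvr.2.2.1
    have hvn : v < (quiet.length : Int) := hvr.2.2.2
    have hsget : PySem.List.pyGet? seen v = some (seen.getD v.toNat true) :=
      pvGetD_of_range (d := true) (xs := seen) (i := v) hv0 (by rw [hslen]; omega)
    have hirr : seen.getD v.toNat true = seen.getD v.toNat false :=
      pvGetD_irrel (by rw [hslen]; omega) true false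
    simp only [List.foldl_cons]
    by_cases hseen : seen.getD v.toNat false = true
    · -- already seen: state unchanged
      rw [hsget]
      simp only [Option.getD_some]
      rw [hirr, if_neg (by rw [hseen]; simp)]
      have hvm : v ∈ order := (hiff v hv0 hvn).1 hseen
      obtain ⟨c1, c2, c3, c4, c5, c6⟩ := ih u seen order nxt order0
        ⟨hslen, hond, hor, hiff⟩ (fun w hw => hrow w (by simp [hw])) hru h0sub hnsub hsplit hnew
      refine ⟨c1, c2, c3, c4, c5, fun w hw => ?_⟩
      rcases List.mem_cons.1 hw with rfl | hw
      · exact c2 hvm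
      · exact c6 w hw
    · -- newly discovered
      rw [hsget]
      simp only [Option.getD_some]
      rw [hirr, if_pos (by simpa using hseen)]
      have hvnm : v ∉ order := fun hm => hseen ((hiff v hv0 hvn).2 hm)
      have hreachv : pvReaches E i v := pvReaches_trans hru (.step hedge (.refl _))
      have hsetd : PySem.List.pySetD seen v true = seen.set v.toNat true :=
        PySem.List.pySetD_of_nonneg seen true hv0
      have hbinv' : pvBInv E quiet i (PySem.List.pySetD seen v true) (order ++ [v]) := by
        refine ⟨by rw [hsetd]; simpa using hslen, ?_, ?_, ?_⟩
        · rw [List.nodup_append]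
          exact ⟨hond, by simp, by intro a ha b hb; rcases List.mem_singleton.1 hb with rfl; exact fun h => hvnm (h ▸ ha)⟩
        · intro w hw
          rcases List.mem_append.1 hw with hw | hw
          · exact hor w hw
          · rcases List.mem_singleton.1 hw with rfl
            exact ⟨hv0, hvn, hreachv⟩
        · intro w hw0 hwn
          by_cases hwv : w = v
          · subst hwv
            rw [hsetd]
            constructor
            · intro _; simp
            · intro _
              rw [List.getD_eq_getElem?_getD, List.getElem?_set_self (by rw [hslen]; omega)]
              rfl
          · have hwtn : w.toNat ≠ v.toNat := by omega
            rw [hsetd]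
            rw [List.getD_eq_getElem?_getD, List.getElem?_set_ne (fun h => hwtn h.symm),
              ← List.getD_eq_getElem?_getD]
            rw [hiff w hw0 hwn]
            simp [hwv]
      obtain ⟨c1, c2, c3, c4, c5, c6⟩ := ih u (PySem.List.pySetD seen v true) (order ++ [v])
        (nxt ++ [v]) order0 hbinv' (fun w hw => hrow w (by simp [hw])) hru
        (fun w hw => List.mem_append.2 (Or.inl (h0sub hw)))
        (fun w hw => by
          rcases List.mem_append.1 hw with hw | hw
          · exact List.mem_append.2 (Or.inl (hnsub hw))
          · exact List.mem_append.2 (Or.inr hw))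
        (fun w hw => by
          rcases List.mem_append.1 hw with hw | hw
          · rcases hsplit w hw with h | h
            · exact Or.inl h
            · exact Or.inr (List.mem_append.2 (Or.inl h))
          · rcases List.mem_singleton.1 hw with rfl
            exact Or.inr (List.mem_append.2 (Or.inr (by simp))))
        (fun w hw => by
          rcases List.mem_append.1 hw with hw | hw
          · exact hnew w hw
          · rcases List.mem_singleton.1 hw with rfl
            intro hc
            exact hvnm (h0sub hc))
      refine ⟨c1, fun w hw => c2 (List.mem_append.2 (Or.inl hw)), c3, c4, c5, fun w hw => ?_⟩
      rcases List.mem_cons.1 hw with rfl | hw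
      · exact c2 (List.mem_append.2 (Or.inr (by simp)))
      · exact c6 w hw

theorem pvBfsRound_correct (E : List (Int × Int)) (quiet : List Int) (g : List (List Int))
    (hv : pvValid E quiet.length) (hglen : g.length = quiet.length)
    (hg : ∀ k : Nat, k < quiet.length → g.getD k [] = pvAdjE E (k : Int)) (i : Int) :
    ∀ (fr : List Int) (seen : List Bool) (order nxt order0 : List Int),
    pvBInv E quiet i seen order →
    fr ⊆ order0 → order0 ⊆ order → nxt ⊆ order →
    (∀ v ∈ order, v ∈ order0 ∨ v ∈ nxt) → (∀ v ∈ nxt, v ∉ order0) →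
    pvBInv E quiet i (pvBfsRound g fr (seen, order, nxt)).1
      (pvBfsRound g fr (seen, order, nxt)).2.1 ∧
    order ⊆ (pvBfsRound g fr (seen, order, nxt)).2.1 ∧
    (pvBfsRound g fr (seen, order, nxt)).2.2 ⊆ (pvBfsRound g fr (seen, order, nxt)).2.1 ∧
    (∀ v ∈ (pvBfsRound g fr (seen, order, nxt)).2.1,
      v ∈ order0 ∨ v ∈ (pvBfsRound g fr (seen, order, nxt)).2.2) ∧
    (∀ v ∈ (pvBfsRound g fr (seen, order, nxt)).2.2, v ∉ order0) ∧
    (∀ u ∈ fr, ∀ v, (u, v) ∈ E → v ∈ (pvBfsRound g fr (seen, order, nxt)).2.1) := by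
  intro fr
  induction fr with
  | nil =>
    intro seen order nxt order0 hbinv _ h0sub hnsub hsplit hnew
    exact ⟨hbinv, fun _ h => h, hnsub, hsplit, hnew, by simp⟩
  | cons u fr ih =>
    intro seen order nxt order0 hbinv hfr h0sub hnsub hsplit hnew
    have hum : u ∈ order := h0sub (hfr (by simp))
    obtain ⟨hu0, hun, hru⟩ := hbinv.2.2.1 u hum
    have hrow : (PySem.List.pyGet? g u).getD [] = pvAdjE E u := by
      rw [pvGetD_of_range (d := []) (xs := g) (i := u) hu0 (by rw [hglen]; omega)]
      have := hg u.toNat (by omega)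
      rw [show ((u.toNat : Nat) : Int) = u by omega] at this
      simpa using this
    obtain ⟨c1, c2, c3, c4, c5, c6⟩ := pvBfsInner E quiet hv i ((PySem.List.pyGet? g u).getD [])
      u seen order nxt order0 hbinv (by rw [hrow]; exact fun w hw => mem_pvAdjE.1 hw) hru
      h0sub hnsub hsplit hnew
    set st1 := ((PySem.List.pyGet? g u).getD []).foldl (fun st v =>
        if (PySem.List.pyGet? st.1 v).getD true = false then
          (PySem.List.pySetD st.1 v true, st.2.1 ++ [v], st.2.2 ++ [v])
        else st) (seen, order, nxt) with hst1
    have hstep : pvBfsRound g (u :: fr) (seen, order, nxt) = pvBfsRound g fr st1 := by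
      unfold pvBfsRound
      rw [List.foldl_cons, hst1]
    have hst1e : st1 = (st1.1, st1.2.1, st1.2.2) := rfl
    obtain ⟨d1, d2, d3, d4, d5, d6⟩ := ih st1.1 st1.2.1 st1.2.2 order0 c1
      (fun w hw => hfr (by simp [hw])) (fun w hw => c2 (h0sub hw)) c3 c4 c5
    rw [← hst1e] at d1 d2 d3 d4 d5 d6
    rw [hstep]
    refine ⟨d1, fun w hw => d2 (c2 hw), d3, d4, d5, fun w hw v hv' => ?_⟩
    rcases List.mem_cons.1 hw with rfl | hw
    · exact d2 (c6 v (by rw [hrow]; exact mem_pvAdjE.2 hv'))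
    · exact d6 w hw v hv'

theorem pvBfsLoop_nil (g : List (List Int)) (fuel : Nat) (seen : List Bool) (order : List Int) :
    pvBfsLoop g fuel [] seen order = order := by
  cases fuel with
  | zero => rfl
  | succ fuel => rw [pvBfsLoop]; simp

theorem pvBfsLoop_correct (E : List (Int × Int)) (quiet : List Int) (g : List (List Int))
    (hv : pvValid E quiet.length) (hglen : g.length = quiet.length)
    (hg : ∀ k : Nat, k < quiet.length → g.getD k [] = pvAdjE E (k : Int)) (i : Int) :
    ∀ (fuel : Nat) (frontier : List Int) (seen : List Bool) (order : List Int),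
    pvBInv E quiet i seen order →
    frontier ⊆ order →
    (∀ u ∈ order, u ∉ frontier → ∀ v, (u, v) ∈ E → v ∈ order) →
    quiet.length + 2 ≤ fuel + order.length →
    i ∈ order →
    (∀ v ∈ pvBfsLoop g fuel frontier seen order,
      0 ≤ v ∧ v < (quiet.length : Int) ∧ pvReaches E i v) ∧
    (∀ j, pvReaches E i j → j ∈ pvBfsLoop g fuel frontier seen order) ∧
    i ∈ pvBfsLoop g fuel frontier seen order := by
  intro fuel
  induction fuel with
  | zero =>
    intro frontier seen order hbinv _ _ hfuel _
    exfalso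
    have := pvIntBound hbinv.2.1 (fun x hx => ⟨(hbinv.2.2.1 x hx).1, (hbinv.2.2.1 x hx).2.1⟩)
    omega
  | succ fuel ihf =>
    intro frontier seen order hbinv hfsub hclosed hfuel him
    by_cases hfe : frontier.isEmpty
    · rw [pvBfsLoop, if_pos hfe]
      have hfnil : frontier = [] := List.isEmpty_iff.1 hfe
      subst hfnil
      refine ⟨hbinv.2.2.1, fun j hj => ?_, him⟩
      exact pvClosed_mem (fun a ha v he => hclosed a ha (by simp) v he) him hj
    · have hloopeq : pvBfsLoop g (fuel + 1) frontier seen order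
          = pvBfsLoop g fuel (pvBfsRound g frontier (seen, order, [])).2.2
              (pvBfsRound g frontier (seen, order, [])).1
              (pvBfsRound g frontier (seen, order, [])).2.1 := by
        rw [pvBfsLoop, if_neg hfe]
      rw [hloopeq]
      obtain ⟨c1, c2, c3, c4, c5, c6⟩ := pvBfsRound_correct E quiet g hv hglen hg i
        frontier seen order [] order hbinv hfsub (fun x hx => hx) (by simp)
        (fun v hv' => Or.inl hv') (by simp)
      set st := pvBfsRound g frontier (seen, order, []) with hst
      have hclosed' : ∀ u ∈ st.2.1, u ∉ st.2.2 → ∀ v, (u, v) ∈ E → v ∈ st.2.1 := by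
        intro u hu hun v he
        rcases c4 u hu with hu0 | hu0
        · by_cases hufr : u ∈ frontier
          · exact c6 u hufr v he
          · exact c2 (hclosed u hu0 hufr v he)
        · exact absurd hu0 hun
      have hisub : i ∈ st.2.1 := c2 him
      by_cases hne : st.2.2 = []
      · rw [hne, pvBfsLoop_nil]
        refine ⟨c1.2.2.1, fun j hj => ?_, hisub⟩
        refine pvClosed_mem (fun a ha v he => ?_) hisub hj
        exact hclosed' a ha (by rw [hne]; simp) v he
      · have hx := List.exists_mem_of_ne_nil _ hne
        obtain ⟨x, hxm⟩ := hx
        have hgrow : order.length + 1 ≤ st.2.1.length :=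
          pvLenLt hbinv.2.1 c1.2.1 c2 (c3 hxm) (c5 x hxm)
        exact ihf st.2.2 st.1 st.2.1 c1 c3 hclosed' (by omega) hisub

theorem pvMinFold (quiet : List Int) :
    ∀ (l : List Int) (b0 : Int),
    ((l.foldl (fun best j =>
      if (PySem.List.pyGet? quiet j).getD 0 < (PySem.List.pyGet? quiet best).getD 0 then j
      else best) b0) = b0 ∨ (l.foldl (fun best j =>
      if (PySem.List.pyGet? quiet j).getD 0 < (PySem.List.pyGet? quiet best).getD 0 then j
      else best) b0) ∈ l) ∧
    pvQ quiet (l.foldl (fun best j =>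
      if (PySem.List.pyGet? quiet j).getD 0 < (PySem.List.pyGet? quiet best).getD 0 then j
      else best) b0) ≤ pvQ quiet b0 ∧
    ∀ j ∈ l, pvQ quiet (l.foldl (fun best j =>
      if (PySem.List.pyGet? quiet j).getD 0 < (PySem.List.pyGet? quiet best).getD 0 then j
      else best) b0) ≤ pvQ quiet j := by
  intro l
  induction l with
  | nil => intro b0; exact ⟨Or.inl rfl, le_refl _, by simp⟩
  | cons x rest ih =>
    intro b0
    simp only [List.foldl_cons]
    set b1 := if (PySem.List.pyGet? quiet x).getD 0 < (PySem.List.pyGet? quiet b0).getD 0 then x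
      else b0 with hb1
    obtain ⟨m1, m2, m3⟩ := ih b1
    have hb1le : pvQ quiet b1 ≤ pvQ quiet b0 := by
      rw [hb1]; split
      · next h => exact le_of_lt (by simpa [pvQ] using h)
      · exact le_refl _
    have hb1x : pvQ quiet b1 ≤ pvQ quiet x := by
      rw [hb1]; split
      · exact le_refl _
      · next h => simpa [pvQ] using h
    refine ⟨?_, le_trans m2 hb1le, fun j hj => ?_⟩
    · rcases m1 with h | h
      · rw [h, hb1]
        split
        · exact Or.inr (by simp)
        · exact Or.inl rfl
      · exact Or.inr (by simp [h])
    · rcases List.mem_cons.1 hj with rfl | hj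
      · exact le_trans m2 hb1x
      · exact m3 j hj

theorem loudAndRich_B_spec (richer : List (List Int)) (quiet : List Int)
    (hpre : Pre_loudAndRich richer quiet) :
    (loudAndRich_alt richer quiet).length = quiet.length ∧
    ∀ k : Nat, k < quiet.length →
      pvIsBest (pvEdges richer) quiet (k : Int) ((loudAndRich_alt richer quiet).getD k 0) := by
  obtain ⟨hglen, hg⟩ := pvBuildGraph_spec hpre
  have hv := pre_valid hpre
  have hBmap : loudAndRich_alt richer quiet = (List.range quiet.length).map (fun i : Nat =>
      List.foldl (fun best j =>
        if (PySem.List.pyGet? quiet j).getD 0 < (PySem.List.pyGet? quiet best).getD 0 then j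
        else best) (i : Int)
      (pvBfsLoop (pvBuildGraph richer quiet.length) (quiet.length + 2) [(i : Int)]
        (PySem.List.pySetD (List.replicate quiet.length false) (i : Int) true) [(i : Int)])) := by
    unfold loudAndRich_alt
    simp only []
    rw [PySem.List.foldl_append_singleton_eq_map]
    simp only [List.nil_append]
  rw [hBmap]
  refine ⟨by simp, fun k hk => ?_⟩
  have hgetk : ((List.range quiet.length).map (fun i : Nat =>
      List.foldl (fun best j =>
        if (PySem.List.pyGet? quiet j).getD 0 < (PySem.List.pyGet? quiet best).getD 0 then j
        else best) (i : Int)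
      (pvBfsLoop (pvBuildGraph richer quiet.length) (quiet.length + 2) [(i : Int)]
        (PySem.List.pySetD (List.replicate quiet.length false) (i : Int) true)
        [(i : Int)]))).getD k 0
      = List.foldl (fun best j =>
        if (PySem.List.pyGet? quiet j).getD 0 < (PySem.List.pyGet? quiet best).getD 0 then j
        else best) (k : Int)
      (pvBfsLoop (pvBuildGraph richer quiet.length) (quiet.length + 2) [(k : Int)]
        (PySem.List.pySetD (List.replicate quiet.length false) (k : Int) true) [(k : Int)]) := by
    rw [List.getD_eq_getElem?_getD, List.getElem?_map]
    simp [List.getElem?_range hk]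
  rw [hgetk]
  have hktn : ((k : Int).toNat) = k := by omega
  have hsetd : PySem.List.pySetD (List.replicate quiet.length false) (k : Int) true
      = (List.replicate quiet.length false).set k true := by
    rw [PySem.List.pySetD_of_nonneg _ true (by omega), hktn]
  have hbinv0 : pvBInv (pvEdges richer) quiet (k : Int)
      (PySem.List.pySetD (List.replicate quiet.length false) (k : Int) true) [(k : Int)] := by
    refine ⟨by rw [hsetd]; simp, by simp, ?_, ?_⟩
    · intro v hv'
      rcases List.mem_singleton.1 hv' with rfl
      exact ⟨by omega, by exact_mod_cast hk, .refl _⟩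
    · intro v hv0 hvn
      rw [hsetd]
      by_cases hvk : v = (k : Int)
      · subst hvk
        rw [List.getD_eq_getElem?_getD, hktn, List.getElem?_set_self (by simp; omega)]
        simp
      · have hne : v.toNat ≠ k := by omega
        rw [List.getD_eq_getElem?_getD, List.getElem?_set_ne (fun h => hne h.symm),
          List.getElem?_replicate]
        have : v.toNat < quiet.length := by omega
        simp [this, hvk]
  obtain ⟨s1, s2, s3⟩ := pvBfsLoop_correct (pvEdges richer) quiet
    (pvBuildGraph richer quiet.length) hv hglen hg (k : Int)
    (quiet.length + 2) [(k : Int)]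
    (PySem.List.pySetD (List.replicate quiet.length false) (k : Int) true) [(k : Int)]
    hbinv0 (fun x hx => hx) (by intro u hu hun v he; exact absurd hu hun) (by simp) (by simp)
  obtain ⟨m1, m2, m3⟩ := pvMinFold quiet
    (pvBfsLoop (pvBuildGraph richer quiet.length) (quiet.length + 2) [(k : Int)]
      (PySem.List.pySetD (List.replicate quiet.length false) (k : Int) true) [(k : Int)])
    (k : Int)
  have hFmem : List.foldl (fun best j =>
        if (PySem.List.pyGet? quiet j).getD 0 < (PySem.List.pyGet? quiet best).getD 0 then j
        else best) (k : Int)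
      (pvBfsLoop (pvBuildGraph richer quiet.length) (quiet.length + 2) [(k : Int)]
        (PySem.List.pySetD (List.replicate quiet.length false) (k : Int) true) [(k : Int)])
      ∈ pvBfsLoop (pvBuildGraph richer quiet.length) (quiet.length + 2) [(k : Int)]
        (PySem.List.pySetD (List.replicate quiet.length false) (k : Int) true) [(k : Int)] := by
    rcases m1 with h | h
    · rw [h]; exact s3
    · exact h
  obtain ⟨f0, fn, fr⟩ := s1 _ hFmem
  exact ⟨fr, f0, fn, fun j hj => m3 j (s2 j hj)⟩

-- ===== VERDICT (by name: the statement is the Claim_ definition above) =====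
theorem loudAndRich_spec : Claim_equal_loudAndRich := by
  intro richer quiet _ hpre
  unfold Spec_loudAndRich
  obtain ⟨hAlen, hA⟩ := loudAndRich_A_spec richer quiet hpre
  obtain ⟨hBlen, hB⟩ := loudAndRich_B_spec richer quiet hpre
  apply List.ext_getElem (by rw [hAlen, hBlen])
  intro k hk1 hk2
  have hk : k < quiet.length := by rwa [hAlen] at hk1
  have e1 : (loudAndRich richer quiet)[k]'hk1 = (loudAndRich richer quiet).getD k 0 := by
    rw [List.getD_eq_getElem?_getD, List.getElem?_eq_getElem hk1]
    rfl
  have e2 : (loudAndRich_alt richer quiet)[k]'hk2 = (loudAndRich_alt richer quiet).getD k 0 := by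
    rw [List.getD_eq_getElem?_getD, List.getElem?_eq_getElem hk2]
    rfl
  rw [e1, e2]
  exact pvIsBest_unique hpre.2.1 (hA k hk) (hB k hk)
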